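-- pv_equiv track=rewrite | github.com/msmeeseeks/recidiviz-data | recidiviz/ingest/aggregate/regions/tn/tn_aggregate_ingest.py | _pretend_facility_is_county
-- ===== SOURCE A (Python) =====
-- _MANUAL_FACILITY_TO_COUNTY_MAP = {
--     'Johnson City (F)': 'Washington',
--     'Kingsport City': 'Sullivan',
-- }
--
-- def _pretend_facility_is_county(facility_name: str):
--     """Format facility_name like a county_name to match each to a fips."""
--     if facility_name in _MANUAL_FACILITY_TO_COUNTY_MAP:
--         return _MANUAL_FACILITY_TO_COUNTY_MAP[facility_name]
--
--     words_after_county_name = [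
--         '-',
--         'Annex',
--         'Co. Det. Center',
--         'Det. Center',
--         'Det, Center',
--         'Extension',
--         'Jail',
--         'SCCC',
--         'Work Center',
--         'Workhouse',
--     ]
--     for delimiter in words_after_county_name:
--         facility_name = facility_name.split(delimiter)[0]
--
--     return facility_name
-- ===== SOURCE B (Python) =====
-- _MANUAL_FACILITY_TO_COUNTY_MAP = {
--     'Johnson City (F)': 'Washington',
--     'Kingsport City': 'Sullivan',
-- }
--
-- _WORDS_AFTER_COUNTY_NAME = [
--     '-',
--     'Annex',
--     'Co. Det. Center',
--     'Det. Center',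
--     'Det, Center',
--     'Extension',
--     'Jail',
--     'SCCC',
--     'Work Center',
--     'Workhouse',
-- ]
--
--
-- def _pretend_facility_is_county(facility_name: str):
--     """Format facility_name like a county_name to match each to a fips."""
--     if facility_name in _MANUAL_FACILITY_TO_COUNTY_MAP:
--         return _MANUAL_FACILITY_TO_COUNTY_MAP[facility_name]
--
--     # Maintain a single cut index instead of progressively rebuilding the
--     # string: each delimiter may only move the cut left, searching within
--     # the part that is still kept; slice once at the end.
--     cut = len(facility_name)
--     for delimiter in _WORDS_AFTER_COUNTY_NAME:
--         pos = facility_name.find(delimiter, 0, cut)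
--         if pos != -1:
--             cut = pos
--     return facility_name[:cut]
-- ===== Notes on version B (the rewrite author's own statement) =====
-- stated objective: simpler
-- what changed: Instead of repeatedly splitting and reassigning the string (building a new list and string per delimiter), B keeps one integer cut index, moves it left with a bounded str.find per delimiter, and slices the original string exactly once at the end.
import Mathlib
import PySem

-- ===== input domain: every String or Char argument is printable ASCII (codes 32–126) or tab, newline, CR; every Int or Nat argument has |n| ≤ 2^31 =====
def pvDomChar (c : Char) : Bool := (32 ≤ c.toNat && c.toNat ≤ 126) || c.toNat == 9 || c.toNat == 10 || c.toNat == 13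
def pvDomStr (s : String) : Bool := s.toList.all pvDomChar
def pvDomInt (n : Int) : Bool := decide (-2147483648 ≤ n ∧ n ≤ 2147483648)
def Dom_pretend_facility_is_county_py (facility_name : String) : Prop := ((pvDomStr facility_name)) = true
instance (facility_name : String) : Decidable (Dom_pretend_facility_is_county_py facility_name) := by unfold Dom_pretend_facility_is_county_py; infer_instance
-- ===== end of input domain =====

-- B replaces A's repeated split-and-reassign of the string by one integer cut index moved
-- left with a bounded find per delimiter and a single final slice (objective: simpler).

-- shared module constants (_MANUAL_FACILITY_TO_COUNTY_MAP and the delimiter list)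
def pvManualMap : PySem.Dict String String :=
  PySem.Dict.ofList [("Johnson City (F)", "Washington"), ("Kingsport City", "Sullivan")]

def pvDelims : List String :=
  ["-", "Annex", "Co. Det. Center", "Det. Center", "Det, Center",
   "Extension", "Jail", "SCCC", "Work Center", "Workhouse"]

-- ===== PORT A =====
-- facility_name.split(delimiter)[0]: every delimiter is a nonempty literal, so split? is
-- some, and Python's split never returns an empty list, so [0] is the head.
def pretend_facility_is_county_py (facility_name : String) : String :=
  if pvManualMap.contains facility_name then (pvManualMap.get? facility_name).getD ""
  else
    pvDelims.foldl (fun s d => ((PySem.Str.split? s d).getD []).headD "") facility_name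

-- ===== PORT B =====
def pretend_facility_is_county_py_alt (facility_name : String) : String :=
  if pvManualMap.contains facility_name then (pvManualMap.get? facility_name).getD ""
  else
    let cut : Int := (PySem.Str.len facility_name : Int)
    let cut : Int := pvDelims.foldl (fun c d =>
      let pos := PySem.Str.findFrom facility_name d 0 (some c)
      if pos ≠ -1 then pos else c) cut
    PySem.Str.slice facility_name none (some cut)

-- ===== PRECONDITION & SPEC =====
def Spec_pretend_facility_is_county_py (facility_name : String) (out : String) : Prop := out = pretend_facility_is_county_py_alt facility_name
instance (facility_name : String) (out : String) : Decidable (Spec_pretend_facility_is_county_py facility_name out) := by unfold Spec_pretend_facility_is_county_py; infer_instance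

-- ===== CLAIM (what is proved, stated in full; the proofs are below) =====
def Claim_equal_pretend_facility_is_county_py : Prop := ∀ (facility_name : String), Dom_pretend_facility_is_county_py facility_name → Spec_pretend_facility_is_county_py facility_name (pretend_facility_is_county_py facility_name)

-- ===== LEMMAS AND PROOFS =====

-- length (in chars) of the head piece of l.split(sep): chars before the first match of sep
def pvCutLen (sep : List Char) : List Char → Nat
  | [] => 0
  | c :: rest => if sep.isPrefixOf (c :: rest) then 0 else pvCutLen sep rest + 1

theorem pvCutLen_le (sep l : List Char) : pvCutLen sep l ≤ l.length := by
  induction l with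
  | nil => simp [pvCutLen]
  | cons c rest ih =>
    simp only [pvCutLen, List.length_cons]
    split <;> omega

theorem pvFind_go_eq (sub : List Char) (hsub : sub ≠ []) :
    ∀ (l : List Char) (k : Nat),
      PySem.Chars.find.go sub l k =
        if pvCutLen sub l = l.length then -1 else (k : Int) + pvCutLen sub l := by
  intro l
  induction l with
  | nil => intro k; simp [PySem.Chars.find.go, pvCutLen, hsub]
  | cons c rest ih =>
    intro k
    rw [PySem.Chars.find.go]
    by_cases hp : sub.isPrefixOf (c :: rest)
    · simp [hp, pvCutLen]
    · have hle := pvCutLen_le sub rest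
      simp only [hp, ih (k + 1), pvCutLen, List.length_cons]
      split_ifs <;> push_cast <;> omega

theorem pvFind_eq (l sub : List Char) (hsub : sub ≠ []) :
    PySem.Chars.find l sub =
      if pvCutLen sub l = l.length then -1 else (pvCutLen sub l : Int) := by
  have := pvFind_go_eq sub hsub l 0
  simpa [PySem.Chars.find] using this

theorem pvSplitOn_go_acc (sep : List Char) :
    ∀ (fuel : Nat) (l cur : List Char) (acc : List (List Char)),
      PySem.Chars.splitOn.go sep fuel l cur acc =
        acc.reverse ++ PySem.Chars.splitOn.go sep fuel l cur [] := by
  intro fuel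
  induction fuel with
  | zero => intro l cur acc; simp [PySem.Chars.splitOn.go.eq_1]
  | succ f ih =>
    intro l cur acc
    cases l with
    | nil =>
      rw [PySem.Chars.splitOn.go.eq_2 sep (f + 1) cur acc (by omega),
        PySem.Chars.splitOn.go.eq_2 sep (f + 1) cur [] (by omega)]
      simp
    | cons c rest =>
      rw [PySem.Chars.splitOn.go.eq_3, PySem.Chars.splitOn.go.eq_3]
      by_cases hp : sep.isPrefixOf (c :: rest) = true
      · simp only [hp, if_true]
        rw [ih _ _ (cur.reverse :: acc), ih _ _ [cur.reverse]]
        simp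
      · rw [if_neg hp, if_neg hp]
        exact ih _ _ acc

theorem pvSplitOn_go_head (sep : List Char) :
    ∀ (fuel : Nat) (l cur : List Char), l.length < fuel →
      (PySem.Chars.splitOn.go sep fuel l cur []).headD [] =
        cur.reverse ++ l.take (pvCutLen sep l) := by
  intro fuel
  induction fuel with
  | zero => intro l cur h; omega
  | succ f ih =>
    intro l cur h
    cases l with
    | nil =>
      rw [PySem.Chars.splitOn.go.eq_2 sep (f + 1) cur [] (by omega)]
      simp [pvCutLen]
    | cons c rest =>
      rw [PySem.Chars.splitOn.go.eq_3]
      by_cases hp : sep.isPrefixOf (c :: rest) = true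
      · simp only [hp, if_true]
        rw [pvSplitOn_go_acc sep f _ [] [cur.reverse]]
        simp [pvCutLen, hp]
      · rw [if_neg hp]
        have hlen : rest.length < f := by
          simp only [List.length_cons] at h; omega
        rw [ih rest (c :: cur) hlen]
        simp [pvCutLen, hp]

theorem pvSplitOn_head (l sep : List Char) (_hsep : sep ≠ []) :
    (PySem.Chars.splitOn l sep).headD [] = l.take (pvCutLen sep l) := by
  rw [PySem.Chars.splitOn]
  exact pvSplitOn_go_head sep _ l [] (by omega)

-- B's loop body at the List Char level
def pvStepB (cs : List Char) (c : Int) (d : List Char) : Int :=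
  let pos := PySem.Chars.findFrom cs d 0 (some c)
  if pos ≠ -1 then pos else c

theorem pvStep_eq (cs d : List Char) (c : Int) (hd : d ≠ [])
    (h0 : 0 ≤ c) (hc : c ≤ cs.length) :
    (PySem.Chars.splitOn (cs.take c.toNat) d).headD [] = cs.take (pvStepB cs c d).toNat
      ∧ 0 ≤ pvStepB cs c d ∧ pvStepB cs c d ≤ c := by
  have htlen : (cs.take c.toNat).length = c.toNat := by
    simp; omega
  have hfind := pvFind_eq (cs.take c.toNat) d hd
  have hcut := pvCutLen_le d (cs.take c.toNat)
  rw [htlen] at hfind hcut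
  have hff : PySem.Chars.findFrom cs d 0 (some c) =
      (if PySem.Chars.find (cs.take c.toNat) d = -1 then -1
       else PySem.Chars.find (cs.take c.toNat) d) := by
    simp only [PySem.Chars.findFrom]
    rw [if_neg (show ¬ ((cs.length : Int) < c) by omega)]
    rw [if_neg (show ¬ (c < (0 : Int)) by omega)]
    norm_num
    intro h _
    omega
  have hsb : pvStepB cs c d =
      (if pvCutLen d (cs.take c.toNat) = c.toNat then c
       else (pvCutLen d (cs.take c.toNat) : Int)) := by
    unfold pvStepB
    rw [hff, hfind]
    by_cases hm : pvCutLen d (cs.take c.toNat) = c.toNat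
    · simp [hm]
    · have hne : ¬ ((pvCutLen d (cs.take c.toNat) : Int) = -1) := by omega
      simp [hm, hne]
  rw [pvSplitOn_head _ _ hd, hsb]
  refine ⟨?_, ?_, ?_⟩
  · by_cases hm : pvCutLen d (cs.take c.toNat) = c.toNat
    · rw [if_pos hm, List.take_take, hm]
      simp
    · rw [if_neg hm, List.take_take, Int.toNat_natCast]
      congr 1
      omega
  · split_ifs <;> omega
  · split_ifs <;> omega

theorem pvFold_eq (D : List String) (hD : ∀ d ∈ D, d.toList ≠ []) :
    ∀ (cs : List Char) (c : Int), 0 ≤ c → c ≤ cs.length →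
      (D.foldl (fun t d => (PySem.Chars.splitOn t d.toList).headD []) (cs.take c.toNat)
          = cs.take ((D.foldl (fun c d => pvStepB cs c d.toList) c).toNat))
        ∧ 0 ≤ D.foldl (fun c d => pvStepB cs c d.toList) c
        ∧ D.foldl (fun c d => pvStepB cs c d.toList) c ≤ cs.length := by
  induction D with
  | nil => intro cs c h0 hc; exact ⟨rfl, h0, hc⟩
  | cons d D ih =>
    intro cs c h0 hc
    have hd : d.toList ≠ [] := hD d (by simp)
    have hstep := pvStep_eq cs d.toList c hd h0 hc
    have hD' : ∀ d' ∈ D, d'.toList ≠ [] := fun d' h => hD d' (by simp [h])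
    have hrec := ih hD' cs (pvStepB cs c d.toList) hstep.2.1 (le_trans hstep.2.2 hc)
    simp only [List.foldl_cons]
    rw [hstep.1]
    exact ⟨hrec.1, hrec.2.1, hrec.2.2⟩

theorem pvHeadD_map_ofList (l : List (List Char)) :
    (l.map String.ofList).headD "" = String.ofList (l.headD []) := by
  cases l <;> rfl

theorem pvStepA_toList (s d : String) (hd : d.toList ≠ []) :
    (((PySem.Str.split? s d).getD []).headD "").toList =
      (PySem.Chars.splitOn s.toList d.toList).headD [] := by
  rw [PySem.Str.split?, PySem.Chars.split?]
  rw [if_neg (by simpa using hd)]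
  simp only [Option.map_some, Option.getD_some]
  rw [pvHeadD_map_ofList]
  simp

theorem pvDelims_ne : ∀ d ∈ pvDelims, d.toList ≠ [] := by decide

theorem pvFoldA_toList (D : List String) (hD : ∀ d ∈ D, d.toList ≠ []) (s : String) :
    (D.foldl (fun s d => ((PySem.Str.split? s d).getD []).headD "") s).toList
      = D.foldl (fun t d => (PySem.Chars.splitOn t d.toList).headD []) s.toList := by
  induction D generalizing s with
  | nil => rfl
  | cons d D ih =>
    simp only [List.foldl_cons]
    rw [ih (fun d' h => hD d' (by simp [h]))]
    congr 1
    exact pvStepA_toList s d (hD d (by simp))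

-- ===== VERDICT (by name: the statement is the Claim_ definition above) =====
theorem pretend_facility_is_county_py_spec : Claim_equal_pretend_facility_is_county_py := by
  intro facility_name _
  unfold Spec_pretend_facility_is_county_py
  unfold pretend_facility_is_county_py pretend_facility_is_county_py_alt
  by_cases hmem : pvManualMap.contains facility_name
  · simp [hmem]
  · simp only [hmem, if_false, Bool.false_eq_true]
    have hlen0 : (0 : Int) ≤ (PySem.Str.len facility_name : Int) := Int.natCast_nonneg _
    have hlen1 : (PySem.Str.len facility_name : Int) ≤ facility_name.toList.length := by
      simp [PySem.Str.len]
    have hfold := pvFold_eq pvDelims pvDelims_ne facility_name.toList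
      (PySem.Str.len facility_name) hlen0 hlen1
    have hinit : facility_name.toList.take ((PySem.Str.len facility_name : Int)).toNat
        = facility_name.toList := by
      simp [PySem.Str.len]
    rw [hinit] at hfold
    -- B's cut loop is the Chars-level loop, definitionally
    have hB : (pvDelims.foldl (fun c d =>
          let pos := PySem.Str.findFrom facility_name d 0 (some c)
          if pos ≠ -1 then pos else c) (PySem.Str.len facility_name : Int))
        = pvDelims.foldl (fun c d => pvStepB facility_name.toList c d.toList)
            (PySem.Str.len facility_name : Int) := rfl
    apply String.toList_inj.mp
    rw [pvFoldA_toList pvDelims pvDelims_ne facility_name, hfold.1]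
    simp only [hB]
    rw [PySem.Str.toList_slice, PySem.Chars.slice_eq_listSlice,
      PySem.List.slice_to _ hfold.2.1]
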